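-- pv_equiv track=rewrite | github.com/nemoarchive/firecloud-client | nemo_firecloud_client.py | get_prioritized_endpoint
-- ===== SOURCE A (Python) =====
-- def get_prioritized_endpoint(manifest_urls, priorities):
--     url_list = []
--
--     urls = manifest_urls.split(',')
--     eps = priorities.split(',')
--
--     # If the user didn't provide a set of priorities, then prioritize based on
--     # whether on an EC2 instance.
--     if eps[0] == "":
--         eps = ['HTTP', 'S3'] # if none provided, use this order
--
--     # Go through and build a list starting with the higher priorities first.
--     for ep in eps:
--         for url in urls:
--             if url.startswith(ep.lower()):
--
--                 # Quick fix until the correct endpoints for the demo data (bucket+key) are established on S3.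
--                 if 's3://' in url and 'HMDEMO' in url:
--                     elements = url.split('/')
--                     url = "s3://{0}/DEMO/{1}/{2}".format(elements[2],elements[4],"/".join(elements[-4:]))
--
--                 url_list.append(url)
--
--     return url_list
-- ===== SOURCE B (Python) =====
-- def _rewrite(url):
--     # same demo-data fix as the original, factored out
--     if 's3://' in url and 'HMDEMO' in url:
--         elements = url.split('/')
--         return "s3://{0}/DEMO/{1}/{2}".format(elements[2], elements[4], "/".join(elements[-4:]))
--     return url
--
-- def get_prioritized_endpoint(manifest_urls, priorities):
--     eps = priorities.split(',')
--     if eps[0] == "":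
--         eps = ['HTTP', 'S3']
--     lows = [ep.lower() for ep in eps]
--     buckets = [[] for _ in lows]
--     # one pass over the URLs in original order, grouping into per-priority buckets
--     for url in manifest_urls.split(','):
--         buckets = [b + [_rewrite(url)] if url.startswith(lo) else b
--                    for b, lo in zip(buckets, lows)]
--     # emit buckets in priority order
--     return [u for b in buckets for u in b]
-- ===== Notes on version B (the rewrite author's own statement) =====
-- stated objective: alternative
-- what changed: B makes one pass over the URLs in original order, grouping each (rewritten) URL into a per-priority bucket for every prefix it matches, and then emits the buckets in priority order, instead of A's priority-major rescan of the whole URL list per priority.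
import Mathlib
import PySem

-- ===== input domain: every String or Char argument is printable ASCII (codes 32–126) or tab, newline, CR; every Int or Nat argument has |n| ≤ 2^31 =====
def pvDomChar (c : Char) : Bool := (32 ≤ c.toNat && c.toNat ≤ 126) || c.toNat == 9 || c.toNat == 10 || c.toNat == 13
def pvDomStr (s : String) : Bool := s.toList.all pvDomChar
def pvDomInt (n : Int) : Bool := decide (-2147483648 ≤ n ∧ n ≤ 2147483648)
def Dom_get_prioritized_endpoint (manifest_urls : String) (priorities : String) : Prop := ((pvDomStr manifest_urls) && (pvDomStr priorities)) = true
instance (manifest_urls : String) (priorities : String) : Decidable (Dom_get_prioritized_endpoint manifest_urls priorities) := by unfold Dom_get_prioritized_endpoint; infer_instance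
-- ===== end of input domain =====

-- B groups the URLs into per-priority buckets in ONE pass over the URL list and then
-- emits the buckets in priority order, instead of A's priority-major rescan of the
-- URL list; objective: alternative decomposition (same output, same asymptotic cost).

-- ===== PORT A =====
def get_prioritized_endpoint (manifest_urls : String) (priorities : String) : List String :=
  let urls := ((PySem.Str.split? manifest_urls ",").getD [])
  let eps := ((PySem.Str.split? priorities ",").getD [])
  let eps := if (eps.headD "") == "" then ["HTTP", "S3"] else eps
  eps.foldl (fun url_list ep =>
    urls.foldl (fun url_list url =>
      if PySem.Str.startswith url (PySem.Str.lower ep) then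
        let url :=
          if PySem.Str.isIn "s3://" url && PySem.Str.isIn "HMDEMO" url then
            -- elements[2]/elements[4] raise IndexError when absent: excluded by Pre_
            let elements := ((PySem.Str.split? url "/").getD [])
            "s3://" ++ ((PySem.List.pyGet? elements 2).getD "") ++ "/DEMO/" ++
              ((PySem.List.pyGet? elements 4).getD "") ++ "/" ++
              PySem.Str.join "/" (PySem.List.slice elements (some (-4)) none)
          else url
        url_list ++ [url]
      else url_list) url_list) []

-- ===== PORT B =====
-- Source B's _rewrite helper
def pvRewrite (url : String) : String :=
  if PySem.Str.isIn "s3://" url && PySem.Str.isIn "HMDEMO" url then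
    let elements := ((PySem.Str.split? url "/").getD [])
    "s3://" ++ ((PySem.List.pyGet? elements 2).getD "") ++ "/DEMO/" ++
      ((PySem.List.pyGet? elements 4).getD "") ++ "/" ++
      PySem.Str.join "/" (PySem.List.slice elements (some (-4)) none)
  else url

def get_prioritized_endpoint_alt (manifest_urls : String) (priorities : String) : List String :=
  let eps := ((PySem.Str.split? priorities ",").getD [])
  let eps := if (eps.headD "") == "" then ["HTTP", "S3"] else eps
  let lows := eps.map (fun ep => PySem.Str.lower ep)
  let buckets : List (List String) := lows.map (fun _ => [])
  let buckets := (((PySem.Str.split? manifest_urls ",").getD [])).foldl (fun bs url =>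
    List.zipWith (fun b lo => if PySem.Str.startswith url lo then b ++ [pvRewrite url] else b)
      bs lows) buckets
  buckets.flatten

-- ===== PRECONDITION & SPEC =====
-- Pre_ excludes exactly the inputs on which A raises IndexError: a URL that matches some
-- priority prefix, contains 's3://' and 'HMDEMO', but splits on '/' into fewer than 5 pieces.
def Pre_get_prioritized_endpoint (manifest_urls : String) (priorities : String) : Prop :=
  let eps := ((PySem.Str.split? priorities ",").getD [])
  let eps := if (eps.headD "") == "" then ["HTTP", "S3"] else eps
  ∀ url ∈ ((PySem.Str.split? manifest_urls ",").getD []),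
    (PySem.Str.isIn "s3://" url = true ∧ PySem.Str.isIn "HMDEMO" url = true ∧
      ∃ ep ∈ eps, PySem.Str.startswith url (PySem.Str.lower ep) = true) →
    5 ≤ (((PySem.Str.split? url "/").getD [])).length
instance (manifest_urls : String) (priorities : String) : Decidable (Pre_get_prioritized_endpoint manifest_urls priorities) := by unfold Pre_get_prioritized_endpoint; infer_instance

def pvWitness_get_prioritized_endpoint : String × String :=
  ("http://a/x,s3://b/k/HMDEMO/c/d", "HTTP,S3")

def Spec_get_prioritized_endpoint (manifest_urls : String) (priorities : String) (out : List String) : Prop := out = get_prioritized_endpoint_alt manifest_urls priorities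
instance (manifest_urls : String) (priorities : String) (out : List String) : Decidable (Spec_get_prioritized_endpoint manifest_urls priorities out) := by unfold Spec_get_prioritized_endpoint; infer_instance

-- ===== CLAIM (what is proved, stated in full; the proofs are below) =====
def Claim_equal_get_prioritized_endpoint : Prop := ∀ (manifest_urls : String) (priorities : String), Dom_get_prioritized_endpoint manifest_urls priorities → Pre_get_prioritized_endpoint manifest_urls priorities → Spec_get_prioritized_endpoint manifest_urls priorities (get_prioritized_endpoint manifest_urls priorities)

-- ===== LEMMAS AND PROOFS =====

-- A's inner loop appends the matching, rewritten URLs.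
theorem pvInnerA (urls : List String) (lo : String) (acc : List String)
    (rw : String → String) :
    urls.foldl (fun url_list url =>
      if PySem.Str.startswith url lo then url_list ++ [rw url] else url_list) acc
      = acc ++ (urls.filter (fun url => PySem.Str.startswith url lo)).map rw := by
  induction urls generalizing acc with
  | nil => simp
  | cons u us ih =>
    by_cases h : PySem.Str.startswith u lo
    · rw [List.foldl_cons, if_pos h, ih, List.filter_cons, if_pos h, List.map_cons]
      simp only [List.append_assoc, List.singleton_append]
    · rw [List.foldl_cons, if_neg h, ih, List.filter_cons, if_neg h]

-- A's whole loop nest, in canonical form.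
theorem pvA_eq (urls eps : List String) (acc : List String) :
    eps.foldl (fun url_list ep =>
      urls.foldl (fun url_list url =>
        if PySem.Str.startswith url (PySem.Str.lower ep) then url_list ++ [pvRewrite url]
        else url_list) url_list) acc
    = acc ++ (eps.map (fun ep =>
        (urls.filter (fun url => PySem.Str.startswith url (PySem.Str.lower ep))).map pvRewrite)).flatten := by
  induction eps generalizing acc with
  | nil => simp
  | cons e es ih =>
    rw [List.foldl_cons, pvInnerA urls (PySem.Str.lower e) acc pvRewrite, ih,
      List.map_cons, List.flatten_cons, List.append_assoc]

theorem pvZipSelf {α β γ : Type} (f : β → α → γ) (g : α → β) (l : List α) :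
    List.zipWith f (l.map g) l = l.map (fun x => f (g x) x) := by
  induction l with
  | nil => rfl
  | cons x xs ih => simp [ih]

-- B's bucket-building pass computes, per priority prefix, exactly A's inner loop result.
theorem pvBuckets (urls : List String) (lows : List String) (g : String → List String) :
    urls.foldl (fun bs url =>
        List.zipWith (fun b lo => if PySem.Str.startswith url lo then b ++ [pvRewrite url] else b)
          bs lows) (lows.map g)
      = lows.map (fun lo => g lo ++ (urls.filter (fun url => PySem.Str.startswith url lo)).map pvRewrite) := by
  induction urls generalizing g with
  | nil => simp
  | cons u us ih =>
    simp only [List.foldl_cons]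
    rw [pvZipSelf (fun (b : List String) (lo : String) =>
        if PySem.Str.startswith u lo then b ++ [pvRewrite u] else b) g lows]
    rw [ih (fun lo => if PySem.Str.startswith u lo then g lo ++ [pvRewrite u] else g lo)]
    apply List.map_congr_left
    intro lo _
    by_cases h : PySem.Str.startswith u lo
    · rw [if_pos h, List.filter_cons, if_pos h, List.map_cons]
      simp only [List.append_assoc, List.singleton_append]
    · rw [if_neg h, List.filter_cons, if_neg h]

-- the two loop nests agree for any url list and any priority list
theorem pvAB (urls eps : List String) :
    eps.foldl (fun url_list ep =>
      urls.foldl (fun url_list url =>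
        if PySem.Str.startswith url (PySem.Str.lower ep) then url_list ++ [pvRewrite url]
        else url_list) url_list) []
    = (urls.foldl (fun bs url =>
        List.zipWith (fun b lo => if PySem.Str.startswith url lo then b ++ [pvRewrite url] else b)
          bs (eps.map (fun ep => PySem.Str.lower ep)))
        ((eps.map (fun ep => PySem.Str.lower ep)).map (fun _ => []))).flatten := by
  rw [pvA_eq, pvBuckets urls (eps.map (fun ep => PySem.Str.lower ep)) (fun _ => []),
    List.map_map]
  simp only [List.nil_append, Function.comp_def]

theorem pvMain (manifest_urls priorities : String) :
    get_prioritized_endpoint manifest_urls priorities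
      = get_prioritized_endpoint_alt manifest_urls priorities :=
  pvAB ((PySem.Str.split? manifest_urls ",").getD [])
    (if ((((PySem.Str.split? priorities ",").getD [])).headD "") == "" then ["HTTP", "S3"]
      else ((PySem.Str.split? priorities ",").getD []))

-- ===== VERDICT (by name: the statement is the Claim_ definition above) =====
theorem get_prioritized_endpoint_spec : Claim_equal_get_prioritized_endpoint := by
  intro m p _ _
  unfold Spec_get_prioritized_endpoint
  exact pvMain m p
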